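-- pv_equiv track=rewrite | github.com/ayanalamMOON/LeetCodeProblemSolutions | Rgegular_Practice_Problems/Problem1/InPython.py | numWaysPythonic
-- ===== SOURCE A (Python) =====
-- from typing import List
--
-- def numWaysPythonic(words: List[str], target: str) -> int:
--     """
--     More Pythonic approach using collections.Counter
--     """
--     from collections import Counter
--
--     MOD = 1000000007
--     m = len(target)
--     n = len(words[0])
--
--     if m > n:
--         return 0
--
--     # Use Counter for more Pythonic frequency counting
--     freq = [Counter() for _ in range(n)]
--     for word in words:
--         for i, char in enumerate(word):
--             freq[i][char] += 1
--
--     # DP with defaultdict for cleaner code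
--     from collections import defaultdict
--     dp = defaultdict(int)
--
--     # Base case
--     for j in range(n + 1):
--         dp[(0, j)] = 1
--
--     for i in range(1, m + 1):
--         for j in range(1, n + 1):
--             dp[(i, j)] = dp[(i, j-1)]
--
--             if target[i-1] in freq[j-1]:
--                 dp[(i, j)] = (dp[(i, j)] + dp[(i-1, j-1)] * freq[j-1][target[i-1]]) % MOD
--
--     return dp[(m, n)]
-- ===== SOURCE B (Python) =====
-- def numWaysPythonic(words, target):
--     """Sparse row DP: inverted char->columns index, each dp row stored as a
--     step function (list of (column, value) breakpoints), advanced with a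
--     two-pointer walk instead of scanning every column per row."""
--     MOD = 1000000007
--     m = len(target)
--     n = len(words[0])
--     if m > n:
--         return 0
--     from collections import Counter
--     freq = [Counter() for _ in range(n)]
--     for word in words:
--         for i, char in enumerate(word):
--             freq[i][char] += 1
--     # inverted index: char -> ascending list of (column, count), columns 1-based
--     index = {}
--     for j in range(n):
--         for ch, c in freq[j].items():
--             index.setdefault(ch, []).append((j + 1, c))
--     # row i of the DP as a step function: value at column j is the value of the
--     # last breakpoint with column <= j (0 before the first breakpoint)
--     prev = [(0, 1)]                     # row 0: dp == 1 everywhere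
--     for i in range(1, m + 1):
--         events = index.get(target[i - 1], [])
--         row = []
--         acc = 0
--         pval = 0                        # prev row's value at the walk position
--         p = 0                           # pointer into prev
--         for (j, c) in events:
--             while p < len(prev) and prev[p][0] <= j - 1:
--                 pval = prev[p][1]
--                 p += 1
--             acc = (acc + pval * c) % MOD
--             row.append((j, acc))
--         prev = row
--     return prev[-1][1] if prev else 0
-- ===== Notes on version B (the rewrite author's own statement) =====
-- stated objective: alternative
-- what changed: Replaces the dense 2D tuple-keyed dict DP (inner loop over every column per target position) with an inverted char->columns index and sparse step-function rows: each dp row is a list of (column, value) breakpoints, only columns actually containing the needed character are visited, and the previous row is read with a monotone two-pointer walk instead of a dict lookup.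
import Mathlib
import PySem

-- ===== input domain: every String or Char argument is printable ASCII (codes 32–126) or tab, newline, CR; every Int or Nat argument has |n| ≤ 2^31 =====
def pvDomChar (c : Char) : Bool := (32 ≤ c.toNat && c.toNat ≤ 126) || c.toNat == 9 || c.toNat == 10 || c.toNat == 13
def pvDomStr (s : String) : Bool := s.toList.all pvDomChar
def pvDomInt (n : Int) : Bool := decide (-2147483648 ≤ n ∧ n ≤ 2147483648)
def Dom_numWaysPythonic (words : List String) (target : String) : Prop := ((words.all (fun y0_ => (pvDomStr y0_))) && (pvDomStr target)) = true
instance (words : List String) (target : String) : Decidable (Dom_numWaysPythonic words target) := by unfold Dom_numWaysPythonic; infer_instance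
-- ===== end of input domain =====

-- B replaces A's dense 2D tuple-keyed dict DP by an inverted char→columns index with sparse
-- step-function rows read by a two-pointer walk; same return value on all admitted inputs.

def pvMOD : Int := 1000000007

-- ===== PORT A =====
-- enumerate indices are nonnegative, so `.toNat` on them is exact;
-- defaultdict's key-inserting reads do not affect any looked-up value, so reads are ported as getD 0.
def numWaysPythonic (words : List String) (target : String) : Int :=
  let m : Int := PySem.Str.len target
  let n : Int := PySem.Str.len ((PySem.List.pyGet? words 0).getD "")
  if m > n then 0
  else
    let freq : List (PySem.Dict Char Int) :=
      words.foldl (fun fr word =>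
        (PySem.List.enumerate word.toList 0).foldl
          (fun fr p => fr.set p.1.toNat ((fr[p.1.toNat]?.getD PySem.Dict.empty).modify p.2 0 (· + 1)))
          fr)
        ((PySem.List.pyRange 0 n 1).map (fun _ => PySem.Dict.empty))
    let dp0 : PySem.Dict (Int × Int) Int :=
      (PySem.List.pyRange 0 (n + 1) 1).foldl (fun dp j => dp.insert ((0 : Int), j) (1 : Int)) PySem.Dict.empty
    let dp :=
      (PySem.List.pyRange 1 (m + 1) 1).foldl (fun dp i =>
        (PySem.List.pyRange 1 (n + 1) 1).foldl (fun dp j =>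
          let dp := dp.insert (i, j) (dp.getD (i, j - 1) 0)
          let col := (PySem.List.pyGet? freq (j - 1)).getD PySem.Dict.empty
          let tc := (PySem.Str.pyGet? target (i - 1)).getD ' '
          if col.contains tc then
            dp.insert (i, j) (PySem.Int.mod (dp.getD (i, j) 0 + dp.getD (i - 1, j - 1) 0 * col.getD tc 0) pvMOD)
          else dp)
          dp)
        dp0
    dp.getD (m, n) 0

-- ===== PORT B =====
-- the `while p < len(prev) and prev[p][0] <= lim: pval = prev[p][1]; p += 1` pointer walk of
-- Source B, transliterated on the remaining suffix of prev (p < len(prev) ↔ the suffix is nonempty)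
def pvAdvance : List (Int × Int) → Int → Int → (List (Int × Int) × Int)
  | [], pval, _ => ([], pval)
  | (pos, v) :: t, pval, lim => if pos ≤ lim then pvAdvance t v lim else ((pos, v) :: t, pval)

-- the body of Source B's `for (j, c) in events` loop; state = (row, acc, rest-of-prev, pval)
def pvStepB (st : List (Int × Int) × Int × List (Int × Int) × Int) (e : Int × Int) :
    List (Int × Int) × Int × List (Int × Int) × Int :=
  let rp := pvAdvance st.2.2.1 st.2.2.2 (e.1 - 1)
  let acc := PySem.Int.mod (st.2.1 + rp.2 * e.2) pvMOD
  (st.1 ++ [(e.1, acc)], acc, rp.1, rp.2)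

def numWaysPythonic_alt (words : List String) (target : String) : Int :=
  let m : Int := PySem.Str.len target
  let n : Int := PySem.Str.len ((PySem.List.pyGet? words 0).getD "")
  if m > n then 0
  else
    let freq : List (PySem.Dict Char Int) :=
      words.foldl (fun fr word =>
        (PySem.List.enumerate word.toList 0).foldl
          (fun fr p => fr.set p.1.toNat ((fr[p.1.toNat]?.getD PySem.Dict.empty).modify p.2 0 (· + 1)))
          fr)
        ((PySem.List.pyRange 0 n 1).map (fun _ => PySem.Dict.empty))
    -- inverted index: char -> ascending list of (column, count), columns 1-based
    let index : PySem.Dict Char (List (Int × Int)) :=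
      (PySem.List.pyRange 0 n 1).foldl (fun idx j =>
        (((PySem.List.pyGet? freq j).getD PySem.Dict.empty).items).foldl
          (fun idx p => idx.insert p.1 ((idx.getD p.1 []) ++ [(j + 1, p.2)])) idx)
        PySem.Dict.empty
    -- each dp row as a step function: list of (column, value) breakpoints
    let prev : List (Int × Int) :=
      (PySem.List.pyRange 1 (m + 1) 1).foldl (fun prev i =>
        ((index.getD ((PySem.Str.pyGet? target (i - 1)).getD ' ') []).foldl pvStepB
          ([], 0, prev, 0)).1)
        [((0 : Int), (1 : Int))]
    match prev.getLast? with
    | some p => p.2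
    | none => 0

-- ===== PRECONDITION & SPEC =====
-- Pre_ excludes exactly the inputs where the Python A raises: empty words (words[0] IndexError),
-- and a word longer than words[0] (freq[i] IndexError while counting) unless the m > n guard
-- returns 0 before the counting loop runs.
def Pre_numWaysPythonic (words : List String) (target : String) : Prop :=
  words ≠ [] ∧ ((words.headD "").length < target.length ∨
    ∀ w ∈ words, w.length ≤ (words.headD "").length)
instance (words : List String) (target : String) : Decidable (Pre_numWaysPythonic words target) := by
  unfold Pre_numWaysPythonic; infer_instance

def pvWitness_numWaysPythonic : List String × String := (["acca", "bbbb", "caca"], "aba")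

def Spec_numWaysPythonic (words : List String) (target : String) (out : Int) : Prop := out = numWaysPythonic_alt words target
instance (words : List String) (target : String) (out : Int) : Decidable (Spec_numWaysPythonic words target out) := by unfold Spec_numWaysPythonic; infer_instance

-- ===== CLAIM (what is proved, stated in full; the proofs are below) =====
def Claim_equal_numWaysPythonic : Prop := ∀ (words : List String) (target : String), Dom_numWaysPythonic words target → Pre_numWaysPythonic words target → Spec_numWaysPythonic words target (numWaysPythonic words target)

-- ===== LEMMAS AND PROOFS =====

-- the membership test / count that column j0 (0-based) contributes for target position i (1-based)
def pvBB (freq : List (PySem.Dict Char Int)) (target : String) (j0 i : Int) : Bool :=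
  ((PySem.List.pyGet? freq j0).getD PySem.Dict.empty).contains ((PySem.Str.pyGet? target (i - 1)).getD ' ')

def pvCC (freq : List (PySem.Dict Char Int)) (target : String) (j0 i : Int) : Int :=
  ((PySem.List.pyGet? freq j0).getD PySem.Dict.empty).getD ((PySem.Str.pyGet? target (i - 1)).getD ' ') 0

lemma pvA_base (N : Nat) (a b : Int) :
    ((PySem.List.pyRange 0 (N : Int) 1).foldl (fun dp j => dp.insert ((0 : Int), j) (1 : Int)) PySem.Dict.empty).getD (a, b) 0
      = if a = 0 ∧ 0 ≤ b ∧ b < (N : Int) then 1 else 0 := by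
  induction N with
  | zero =>
    rw [show ((0:Nat):Int) = 0 by norm_num, PySem.List.pyRange_one_eq_nil le_rfl]
    simp [PySem.Dict.getD_empty]
  | succ N ih =>
    rw [show ((N+1:Nat):Int) = (N:Int) + 1 by push_cast; ring,
        PySem.List.pyRange_one_succ_right (by positivity), List.foldl_append]
    simp only [List.foldl_cons, List.foldl_nil]
    rw [PySem.Dict.getD_insert, ih]
    by_cases h : (a, b) = ((0:Int), (N:Int))
    · rw [Prod.mk.injEq] at h
      obtain ⟨rfl, rfl⟩ := h
      rw [if_pos rfl]
      split_ifs with h2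
      · rfl
      · exfalso; push_cast at h2; simp only [true_and] at h2; omega
    · rw [if_neg h]
      have : ¬(a = 0 ∧ b = (N:Int)) := by simpa [Prod.ext_iff] using h
      split_ifs with h1 h2 <;> omega

def pvW (bb : Int → Int → Bool) (cc : Int → Int → Int) : Nat → Nat → Int
  | 0, _ => 1
  | _ + 1, 0 => 0
  | i + 1, j + 1 =>
    if bb (j : Int) ((i : Int) + 1) then
      PySem.Int.mod (pvW bb cc (i + 1) j + pvW bb cc i j * cc (j : Int) ((i : Int) + 1)) pvMOD
    else pvW bb cc (i + 1) j
  termination_by i j => (i, j)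

def pvStepA (bb : Int → Int → Bool) (cc : Int → Int → Int) (i : Int)
    (dp : PySem.Dict (Int × Int) Int) (j : Int) : PySem.Dict (Int × Int) Int :=
  let dp1 := dp.insert (i, j) (dp.getD (i, j - 1) 0)
  if bb (j - 1) i then
    dp1.insert (i, j) (PySem.Int.mod (dp1.getD (i, j) 0 + dp1.getD (i - 1, j - 1) 0 * cc (j - 1) i) pvMOD)
  else dp1

def pvV (bb : Int → Int → Bool) (cc : Int → Int → Int) (nN I : Nat) (a b : Int) : Int :=
  if a = 0 ∧ 0 ≤ b ∧ b ≤ (nN : Int) then 1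
  else if 1 ≤ a ∧ a ≤ (I : Int) ∧ 1 ≤ b ∧ b ≤ (nN : Int) then pvW bb cc a.toNat b.toNat
  else 0

lemma pvW_zero (bb cc) (J : Nat) : pvW bb cc 0 J = 1 := by cases J <;> simp [pvW]

lemma pvW_row_zero (bb cc) (A : Nat) : pvW bb cc (A + 1) 0 = 0 := by simp [pvW]

lemma pvV_read (bb : Int → Int → Bool) (cc : Int → Int → Int) (nN I : Nat) (A J : Nat)
    (hA : A ≤ I) (hJ : J ≤ nN) :
    pvV bb cc nN I (A : Int) (J : Int) = pvW bb cc A J := by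
  unfold pvV
  rcases Nat.eq_zero_or_pos A with rfl | hA1
  · rw [if_pos (by refine ⟨by norm_num, by omega, by omega⟩), pvW_zero]
  · rcases Nat.eq_zero_or_pos J with rfl | hJ1
    · rw [if_neg (by omega), if_neg (by omega)]
      obtain ⟨A', rfl⟩ : ∃ A', A = A' + 1 := ⟨A - 1, by omega⟩
      rw [pvW_row_zero]
    · rw [if_neg (by omega), if_pos ⟨by omega, by omega, by omega, by omega⟩]
      simp [Int.toNat_natCast]

lemma pvV_out (bb : Int → Int → Bool) (cc : Int → Int → Int) (nN I : Nat) (A : Nat) :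
    pvV bb cc nN I ((A : Int) + 1) 0 = 0 := by
  unfold pvV
  rw [if_neg (by omega), if_neg (by omega)]

lemma pvA_step (bb : Int → Int → Bool) (cc : Int → Int → Int) (nN I J : Nat) (hJ : J < nN)
    (D : PySem.Dict (Int × Int) Int)
    (hD : ∀ a b : Int, D.getD (a, b) 0
      = if a = (I : Int) + 1 ∧ 1 ≤ b ∧ b ≤ (J : Int) then pvW bb cc (I + 1) b.toNat
        else pvV bb cc nN I a b) (a b : Int) :
    (pvStepA bb cc ((I : Int) + 1) D ((J : Int) + 1)).getD (a, b) 0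
      = if a = (I : Int) + 1 ∧ 1 ≤ b ∧ b ≤ (J : Int) + 1 then pvW bb cc (I + 1) b.toNat
        else pvV bb cc nN I a b := by
  have hiJ : D.getD ((I : Int) + 1, (J : Int)) 0 = pvW bb cc (I + 1) J := by
    rw [hD]
    rcases Nat.eq_zero_or_pos J with rfl | hJ1
    · rw [if_neg (by intro h; omega)]
      have := pvV_out bb cc nN I I
      rw [show ((0:Nat):Int) = (0:Int) by norm_num, this, pvW_row_zero]
    · rw [if_pos ⟨rfl, by omega, by omega⟩]
      simp [Int.toNat_natCast]
  have hprev : D.getD ((I : Int), (J : Int)) 0 = pvW bb cc I J := by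
    rw [hD, if_neg (by omega), pvV_read bb cc nN I I J le_rfl (by omega)]
  have hWs : pvW bb cc (I + 1) (J + 1)
      = if bb (J : Int) ((I : Int) + 1) then
          PySem.Int.mod (pvW bb cc (I + 1) J + pvW bb cc I J * cc (J : Int) ((I : Int) + 1)) pvMOD
        else pvW bb cc (I + 1) J := by
    rw [pvW]
  unfold pvStepA
  simp only [add_sub_cancel_right]
  by_cases hk : a = (I : Int) + 1 ∧ b = (J : Int) + 1
  · obtain ⟨rfl, rfl⟩ := hk
    have hc : ((I:Int) + 1 = (I:Int) + 1 ∧ 1 ≤ (J:Int) + 1 ∧ (J:Int) + 1 ≤ (J:Int) + 1) :=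
      ⟨rfl, by omega, le_rfl⟩
    have e3 : ((J : Int) + 1).toNat = J + 1 := by omega
    rw [if_pos hc, e3]
    by_cases hb : bb (J : Int) ((I : Int) + 1)
    · rw [if_pos hb, PySem.Dict.getD_insert_self, PySem.Dict.getD_insert_self,
          PySem.Dict.getD_insert_of_ne _ _ _ (by intro h; rw [Prod.mk.injEq] at h; omega),
          hiJ, hprev, hWs, if_pos hb]
    · rw [if_neg hb, PySem.Dict.getD_insert_self, hiJ, hWs, if_neg hb]
  · have hne : (a, b) ≠ ((I : Int) + 1, (J : Int) + 1) := by
      simp only [ne_eq, Prod.mk.injEq]; tauto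
    by_cases hb : bb (J : Int) ((I : Int) + 1)
    · rw [if_pos hb, PySem.Dict.getD_insert_of_ne _ _ _ hne,
          PySem.Dict.getD_insert_of_ne _ _ _ hne, hD]
      split_ifs with h1 h2 h2 <;> first | rfl | omega
    · rw [if_neg hb, PySem.Dict.getD_insert_of_ne _ _ _ hne, hD]
      split_ifs with h1 h2 h2 <;> first | rfl | omega

lemma pvA_inner (bb : Int → Int → Bool) (cc : Int → Int → Int) (nN I : Nat) (J : Nat)
    (dp : PySem.Dict (Int × Int) Int)
    (H : ∀ a b : Int, dp.getD (a, b) 0 = pvV bb cc nN I a b) :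
    J ≤ nN → ∀ a b : Int,
    ((PySem.List.pyRange 1 ((J : Int) + 1) 1).foldl (pvStepA bb cc ((I : Int) + 1)) dp).getD (a, b) 0
      = if a = (I : Int) + 1 ∧ 1 ≤ b ∧ b ≤ (J : Int) then pvW bb cc (I + 1) b.toNat
        else pvV bb cc nN I a b := by
  induction J with
  | zero =>
    intro _ a b
    rw [show ((0:Nat):Int) + 1 = (1:Int) by norm_num, PySem.List.pyRange_one_eq_nil le_rfl,
        List.foldl_nil, H, if_neg (by intro h; omega)]
  | succ J ih =>
    intro hJ a b
    rw [show ((J+1:Nat):Int) + 1 = ((J:Int) + 1) + 1 by push_cast; ring,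
        show PySem.List.pyRange 1 (((J:Int)+1)+1) = PySem.List.pyRange 1 ((J:Int)+1) ++ [(J:Int)+1]
          from PySem.List.pyRange_one_succ_right (by omega),
        List.foldl_append, List.foldl_cons, List.foldl_nil]
    have := pvA_step bb cc nN I J (by omega) _ (ih (by omega)) a b
    rw [this]
    have ecast : ((J+1:Nat):Int) = (J:Int) + 1 := by push_cast; ring
    rw [ecast]

lemma pvA_outer (bb : Int → Int → Bool) (cc : Int → Int → Int) (nN M : Nat)
    (dp : PySem.Dict (Int × Int) Int)
    (H : ∀ a b : Int, dp.getD (a, b) 0 = pvV bb cc nN 0 a b) :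
    ∀ a b : Int,
    ((PySem.List.pyRange 1 ((M : Int) + 1) 1).foldl
        (fun dp i => (PySem.List.pyRange 1 ((nN : Int) + 1) 1).foldl (pvStepA bb cc i) dp) dp).getD (a, b) 0
      = pvV bb cc nN M a b := by
  induction M with
  | zero =>
    intro a b
    rw [show ((0:Nat):Int) + 1 = (1:Int) by norm_num, PySem.List.pyRange_one_eq_nil le_rfl,
        List.foldl_nil, H]
  | succ M ih =>
    intro a b
    rw [show ((M+1:Nat):Int) + 1 = ((M:Int) + 1) + 1 by push_cast; ring,
        show PySem.List.pyRange 1 (((M:Int)+1)+1) = PySem.List.pyRange 1 ((M:Int)+1) ++ [(M:Int)+1]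
          from PySem.List.pyRange_one_succ_right (by omega),
        List.foldl_append, List.foldl_cons, List.foldl_nil]
    have hinner := pvA_inner bb cc nN M nN _ ih le_rfl a b
    rw [hinner]
    unfold pvV
    by_cases h1 : a = (M:Int) + 1 ∧ 1 ≤ b ∧ b ≤ (nN:Int)
    · obtain ⟨rfl, hb1, hb2⟩ := h1
      rw [if_pos ⟨rfl, hb1, hb2⟩, if_neg (by intro h; omega),
          if_pos ⟨by omega, by push_cast; omega, by omega, by omega⟩]
      have e : ((M:Int)+1).toNat = M + 1 := by omega
      rw [e]
    · rw [if_neg h1]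
      split_ifs with g1 g2 g3 <;> first | rfl | (push_cast at *; omega)

-- ---------- B side ----------

-- evaluate a step-function row at x: value of the last breakpoint with position ≤ x
def pvEval : Int → List (Int × Int) → Int → Int
  | pval, [], _ => pval
  | pval, (pos, v) :: t, x => if pos ≤ x then pvEval v t x else pval

-- the contribution of column j (0-based) to the inverted index at character ch
def pvEvCol (F : List (PySem.Dict Char Int)) (ch : Char) (j : Nat) : List (Int × Int) :=
  if ((PySem.List.pyGet? F (j : Int)).getD PySem.Dict.empty).contains ch
  then [((j : Int) + 1, ((PySem.List.pyGet? F (j : Int)).getD PySem.Dict.empty).getD ch 0)] else []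

def pvEvents (F : List (PySem.Dict Char Int)) (ch : Char) (N : Nat) : List (Int × Int) :=
  (List.range N).flatMap (pvEvCol F ch)

lemma pvEvents_succ (F : List (PySem.Dict Char Int)) (ch : Char) (N : Nat) :
    pvEvents F ch (N + 1) = pvEvents F ch N ++ pvEvCol F ch N := by
  rw [pvEvents, pvEvents, List.range_succ, List.flatMap_append, List.flatMap_singleton]

-- one inner index-building pass: each item appends to its own key's list
lemma pvInnerIdx (l : List (Char × Int)) (idx : PySem.Dict Char (List (Int × Int))) (j : Int) (ch : Char) :
    (l.foldl (fun idx p => idx.insert p.1 ((idx.getD p.1 []) ++ [(j + 1, p.2)])) idx).getD ch []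
      = idx.getD ch [] ++ (l.filter (fun p => p.1 = ch)).map (fun p => (j + 1, p.2)) := by
  induction l generalizing idx with
  | nil => simp
  | cons p l ih =>
    rw [List.foldl_cons, ih, PySem.Dict.getD_insert]
    by_cases h : p.1 = ch
    · subst h
      rw [List.filter_cons_of_pos (by simp), if_pos rfl, List.map_cons, List.append_assoc]
      rfl
    · rw [List.filter_cons_of_neg (by simpa using h), if_neg (fun hh => h hh.symm)]

-- with unique keys, filtering items at a key yields exactly its entry
lemma pvFilterOne (l : List (Char × Int)) (ch : Char) (v : Int)
    (h : (l.map Prod.fst).Nodup) (hm : (ch, v) ∈ l) :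
    l.filter (fun p => p.1 = ch) = [(ch, v)] := by
  induction l with
  | nil => cases hm
  | cons p l ih =>
    simp only [List.map_cons, List.nodup_cons] at h
    rcases List.mem_cons.mp hm with rfl | hm'
    · rw [List.filter_cons_of_pos (by simp)]
      have he : l.filter (fun p => p.1 = ch) = [] := by
        apply List.filter_eq_nil_iff.mpr
        intro q hq hq'
        have hq1 : q.1 = ch := by simpa using hq'
        exact h.1 (List.mem_map.mpr ⟨q, hq, hq1⟩)
      rw [he]
    · have hne : p.1 ≠ ch := by
        intro he
        exact h.1 (he ▸ List.mem_map_of_mem (f := Prod.fst) hm')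
      rw [List.filter_cons_of_neg (by simpa using hne), ih h.2 hm']

lemma pvItemsFilter (d : PySem.Dict Char Int) (hnd : d.keys.Nodup) (ch : Char) (j : Int) :
    ((d.items.filter (fun p => p.1 = ch)).map (fun p => (j + 1, p.2)) : List (Int × Int))
      = if d.contains ch then [(j + 1, d.getD ch 0)] else [] := by
  by_cases hc : d.contains ch
  · rw [if_pos hc]
    have hsome : (d.get? ch).isSome := by rw [← PySem.Dict.contains_eq_isSome_get?, hc]
    obtain ⟨v, hv⟩ := Option.isSome_iff_exists.mp hsome
    have hmem : (ch, v) ∈ d.items := PySem.Dict.mem_items_of_get?_eq_some d hv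
    rw [pvFilterOne d.items ch v hnd hmem, PySem.Dict.getD_of_get?_eq_some d 0 hv]
    rfl
  · rw [if_neg hc]
    have he : d.items.filter (fun p => p.1 = ch) = [] := by
      apply List.filter_eq_nil_iff.mpr
      intro q hq hq'
      have hq1 : q.1 = ch := by simpa using hq'
      have : ch ∈ d.keys := hq1 ▸ PySem.Dict.mem_keys_of_mem_items d hq
      exact absurd ((PySem.Dict.contains_iff_mem_keys d ch).mpr this) (by simp [hc])
    rw [he]; rfl

lemma pvIndex_spec (F : List (PySem.Dict Char Int)) (hnd : ∀ d ∈ F, d.keys.Nodup) (N : Nat) (ch : Char) :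
    ((PySem.List.pyRange 0 (N : Int) 1).foldl (fun idx j =>
        (((PySem.List.pyGet? F j).getD PySem.Dict.empty).items).foldl
          (fun idx p => idx.insert p.1 ((idx.getD p.1 []) ++ [(j + 1, p.2)])) idx)
        PySem.Dict.empty).getD ch []
      = pvEvents F ch N := by
  induction N with
  | zero =>
    rw [show ((0:Nat):Int) = 0 by norm_num, PySem.List.pyRange_one_eq_nil le_rfl]
    simp [pvEvents, PySem.Dict.getD_empty]
  | succ N ih =>
    rw [show ((N+1:Nat):Int) = (N:Int) + 1 by push_cast; ring,
        PySem.List.pyRange_one_succ_right (by positivity), List.foldl_append,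
        List.foldl_cons, List.foldl_nil, pvInnerIdx, ih]
    have hdn : ((PySem.List.pyGet? F (N:Int)).getD PySem.Dict.empty).keys.Nodup := by
      rcases h : PySem.List.pyGet? F (N:Int) with _ | d
      · simp [PySem.Dict.keys_empty]
      · exact hnd d (PySem.List.mem_of_pyGet?_eq_some F h)
    rw [pvItemsFilter _ hdn ch (N:Int), pvEvents_succ, pvEvCol]

-- each frequency dict built by the counting loop has unique keys
lemma pvModify_nodup (d : PySem.Dict Char Int) (h : d.keys.Nodup) (c : Char) :
    (d.modify c 0 (· + 1)).keys.Nodup := by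
  rw [PySem.Dict.keys_modify]
  exact PySem.Dict.nodup_keys_insert d c _ h

lemma pvFreq_nodup (words : List String) (init : List (PySem.Dict Char Int))
    (h : ∀ d ∈ init, d.keys.Nodup) :
    ∀ d ∈ words.foldl (fun fr word =>
        (PySem.List.enumerate word.toList 0).foldl
          (fun fr p => fr.set p.1.toNat ((fr[p.1.toNat]?.getD PySem.Dict.empty).modify p.2 0 (· + 1)))
          fr) init, d.keys.Nodup := by
  induction words generalizing init with
  | nil => simpa using h
  | cons w ws ih =>
    rw [List.foldl_cons]
    apply ih
    generalize PySem.List.enumerate w.toList 0 = l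
    induction l generalizing init with
    | nil => simpa using h
    | cons p t ih2 =>
      rw [List.foldl_cons]
      apply ih2
      intro d hd
      rcases List.mem_or_eq_of_mem_set hd with hd' | rfl
      · exact h d hd'
      · apply pvModify_nodup
        rcases hg : init[p.1.toNat]? with _ | d0
        · simp [PySem.Dict.keys_empty]
        · simpa using h d0 (List.mem_of_getElem? hg)

-- pvEval after appending a later breakpoint
lemma pvEval_append (r : List (Int × Int)) (pval q v x : Int)
    (h : ∀ p ∈ r, p.1 < q) :
    pvEval pval (r ++ [(q, v)]) x = if q ≤ x then v else pvEval pval r x := by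
  induction r generalizing pval with
  | nil =>
    simp only [List.nil_append, pvEval]
  | cons p t ih =>
    obtain ⟨pos, u⟩ := p
    simp only [List.cons_append, pvEval]
    by_cases hp : pos ≤ x
    · rw [if_pos hp, if_pos hp, ih u (fun a ha => h a (List.mem_cons_of_mem _ ha))]
    · have hq : ¬ q ≤ x := by
        have := h (pos, u) (List.mem_cons_self ..); simp only at this; omega
      rw [if_neg hp, if_neg hq, if_neg hp]

-- pvEval when every breakpoint is within range: the last value
lemma pvEval_getLast (r : List (Int × Int)) (pval x : Int) (h : ∀ p ∈ r, p.1 ≤ x) :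
    pvEval pval r x = (match r.getLast? with
      | some p => p.2
      | none => pval) := by
  induction r generalizing pval with
  | nil => rfl
  | cons p t ih =>
    obtain ⟨pos, u⟩ := p
    simp only [pvEval, if_pos (h (pos, u) (List.mem_cons_self ..))]
    rw [ih u (fun a ha => h a (List.mem_cons_of_mem _ ha))]
    cases t with
    | nil => rfl
    | cons q r =>
      rw [List.getLast?_cons_cons]
      cases hql : (q :: r).getLast? with
      | none => simp at hql
      | some pp => rfl

-- pointer invariant: evaluating the remaining suffix from pval agrees with the full row at ≥ w
def pvPtrInv (prev rest : List (Int × Int)) (pval w : Int) : Prop :=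
  ∀ L : Int, w ≤ L → pvEval pval rest L = pvEval 0 prev L

lemma pvPtrInv_mono (prev rest : List (Int × Int)) (pval w w' : Int)
    (h : pvPtrInv prev rest pval w) (hw : w ≤ w') : pvPtrInv prev rest pval w' :=
  fun L hL => h L (le_trans hw hL)

lemma pvAdvance_spec (prev : List (Int × Int)) :
    ∀ (rest : List (Int × Int)) (pval w L : Int), pvPtrInv prev rest pval w → w ≤ L →
    pvPtrInv prev (pvAdvance rest pval L).1 (pvAdvance rest pval L).2 L ∧
      (pvAdvance rest pval L).2 = pvEval 0 prev L := by
  intro rest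
  induction rest with
  | nil =>
    intro pval w L hinv hwL
    refine ⟨fun L' hL' => ?_, ?_⟩
    · have h1 := hinv L' (le_trans hwL hL')
      simpa [pvAdvance, pvEval] using h1
    · simpa [pvAdvance, pvEval] using hinv L hwL
  | cons p t ih =>
    intro pval w L hinv hwL
    obtain ⟨pos, v⟩ := p
    by_cases hp : pos ≤ L
    · have hinv' : pvPtrInv prev t v L := by
        intro L' hL'
        have h1 := hinv L' (le_trans hwL hL')
        rwa [pvEval, if_pos (le_trans hp hL')] at h1
      have := ih v L L hinv' le_rfl
      simpa [pvAdvance, if_pos hp] using this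
    · refine ⟨?_, ?_⟩
      · simp only [pvAdvance, if_neg hp]
        intro L' hL'
        exact hinv L' (le_trans hwL hL')
      · simp only [pvAdvance, if_neg hp]
        have h1 := hinv L hwL
        rwa [pvEval, if_neg hp] at h1

-- invariant of Source B's event loop after all events of columns < b are processed (row index I+1)
def pvInnerInv (bb : Int → Int → Bool) (cc : Int → Int → Int) (I b : Nat)
    (prev : List (Int × Int)) (st : List (Int × Int) × Int × List (Int × Int) × Int) : Prop :=
  (∀ p ∈ st.1, 0 ≤ p.1 ∧ p.1 ≤ (b : Int)) ∧
  (∀ t : Nat, pvEval 0 st.1 (t : Int) = pvW bb cc (I + 1) (min t b)) ∧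
  st.2.1 = pvW bb cc (I + 1) b ∧
  pvPtrInv prev st.2.2.1 st.2.2.2 (b : Int)

lemma pvB_inner (F : List (PySem.Dict Char Int)) (target : String) (I nN : Nat)
    (prev : List (Int × Int))
    (Hp : ∀ t : Nat, t ≤ nN → pvEval 0 prev (t : Int) = pvW (pvBB F target) (pvCC F target) I t) :
    ∀ b : Nat, b ≤ nN →
    pvInnerInv (pvBB F target) (pvCC F target) I b prev
      ((pvEvents F ((PySem.Str.pyGet? target (((I : Int) + 1) - 1)).getD ' ') b).foldl pvStepB
        ([], 0, prev, 0)) := by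
  intro b
  induction b with
  | zero =>
    intro _
    refine ⟨by simp [pvEvents], ?_, ?_, ?_⟩
    · intro t
      simp only [pvEvents, List.range_zero, List.flatMap_nil, List.foldl_nil, Nat.min_zero]
      rw [pvW_row_zero]
      rfl
    · simp only [pvEvents, List.range_zero, List.flatMap_nil, List.foldl_nil]
      rw [pvW_row_zero]
    · simp only [pvEvents, List.range_zero, List.flatMap_nil, List.foldl_nil]
      intro L _; rfl
  | succ b ihb =>
    intro hb
    have ih := ihb (by omega)
    rw [pvEvents_succ, List.foldl_append]
    set st := (pvEvents F ((PySem.Str.pyGet? target (((I : Int) + 1) - 1)).getD ' ') b).foldl pvStepB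
      ([], 0, prev, 0) with hst
    obtain ⟨h1, h2, h3, h4⟩ := ih
    have hWs : pvW (pvBB F target) (pvCC F target) (I + 1) (b + 1)
        = if pvBB F target (b : Int) ((I : Int) + 1) then
            PySem.Int.mod (pvW (pvBB F target) (pvCC F target) (I + 1) b
              + pvW (pvBB F target) (pvCC F target) I b * pvCC F target (b : Int) ((I : Int) + 1)) pvMOD
          else pvW (pvBB F target) (pvCC F target) (I + 1) b := by
      rw [pvW]
    by_cases hbb : pvBB F target (b : Int) ((I : Int) + 1)
    · -- one event at column b+1
      have hcol : pvEvCol F ((PySem.Str.pyGet? target (((I : Int) + 1) - 1)).getD ' ') b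
          = [((b : Int) + 1, pvCC F target (b : Int) ((I : Int) + 1))] := by
        rw [pvEvCol, if_pos (by simpa [pvBB, add_sub_cancel_right] using hbb)]
        rfl
      rw [hcol, List.foldl_cons, List.foldl_nil]
      have hadv := pvAdvance_spec prev st.2.2.1 st.2.2.2 (b : Int) ((b : Int) + 1 - 1)
        h4 (by omega)
      rw [add_sub_cancel_right] at hadv
      obtain ⟨hadv1, hadv2⟩ := hadv
      have hpv : (pvAdvance st.2.2.1 st.2.2.2 ((b : Int) + 1 - 1)).2
          = pvW (pvBB F target) (pvCC F target) I b := by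
        rw [add_sub_cancel_right, hadv2, Hp b (by omega)]
      have hacc : PySem.Int.mod (st.2.1 + (pvAdvance st.2.2.1 st.2.2.2 ((b : Int) + 1 - 1)).2
            * pvCC F target (b : Int) ((I : Int) + 1)) pvMOD
          = pvW (pvBB F target) (pvCC F target) (I + 1) (b + 1) := by
        rw [hpv, h3, hWs, if_pos hbb]
      refine ⟨?_, ?_, ?_, ?_⟩
      · intro p hp
        simp only [pvStepB, List.mem_append, List.mem_singleton] at hp
        rcases hp with hp | rfl
        · have := h1 p hp; constructor <;> [omega; (push_cast; omega)]
        · constructor <;> [positivity; (push_cast; omega)]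
      · intro t
        simp only [pvStepB]
        rw [pvEval_append _ _ _ _ _ (fun p hp => by have := (h1 p hp).2; omega)]
        by_cases ht : (b : Int) + 1 ≤ (t : Int)
        · rw [if_pos ht, hacc]
          congr 1
          omega
        · rw [if_neg ht, h2 t]
          congr 1
          omega
      · simpa only [pvStepB] using hacc
      · simp only [pvStepB]
        exact pvPtrInv_mono prev _ _ ((b : Int)) _ (by rwa [add_sub_cancel_right])
          (by push_cast; omega)
    · -- no event for column b+1
      have hcol : pvEvCol F ((PySem.Str.pyGet? target (((I : Int) + 1) - 1)).getD ' ') b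
          = [] := by
        rw [pvEvCol, if_neg (by simpa [pvBB, add_sub_cancel_right] using hbb)]
      rw [hcol, List.foldl_nil]
      have hsame : pvW (pvBB F target) (pvCC F target) (I + 1) (b + 1)
          = pvW (pvBB F target) (pvCC F target) (I + 1) b := by
        rw [hWs, if_neg hbb]
      refine ⟨?_, ?_, ?_, ?_⟩
      · intro p hp; have := h1 p hp; constructor <;> [omega; (push_cast; omega)]
      · intro t
        rw [h2 t]
        rcases Nat.lt_or_ge b t with ht | ht
        · have e1 : min t b = b := by omega
          have e2 : min t (b + 1) = b + 1 := by omega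
          rw [e1, e2, hsame]
        · congr 1
          omega
      · rw [h3, hsame]
      · exact pvPtrInv_mono prev _ _ _ _ h4 (by push_cast; omega)

lemma pvB_outer (F : List (PySem.Dict Char Int)) (target : String) (nN : Nat) :
    ∀ M : Nat,
    (∀ p ∈ (PySem.List.pyRange 1 ((M : Int) + 1) 1).foldl (fun prev i =>
        ((pvEvents F ((PySem.Str.pyGet? target (i - 1)).getD ' ') nN).foldl pvStepB
          ([], 0, prev, 0)).1) [((0 : Int), (1 : Int))],
      0 ≤ p.1 ∧ p.1 ≤ (nN : Int)) ∧
    (∀ t : Nat, t ≤ nN →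
      pvEval 0 ((PySem.List.pyRange 1 ((M : Int) + 1) 1).foldl (fun prev i =>
        ((pvEvents F ((PySem.Str.pyGet? target (i - 1)).getD ' ') nN).foldl pvStepB
          ([], 0, prev, 0)).1) [((0 : Int), (1 : Int))]) (t : Int)
        = pvW (pvBB F target) (pvCC F target) M t) := by
  intro M
  induction M with
  | zero =>
    rw [show ((0:Nat):Int) + 1 = (1:Int) by norm_num, PySem.List.pyRange_one_eq_nil le_rfl,
        List.foldl_nil]
    constructor
    · intro p hp
      simp only [List.mem_singleton] at hp
      subst hp
      exact ⟨le_refl 0, by positivity⟩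
    · intro t _
      rw [pvW_zero]
      simp [pvEval]
  | succ M ih =>
    rw [show ((M+1:Nat):Int) + 1 = ((M:Int) + 1) + 1 by push_cast; ring,
        show PySem.List.pyRange 1 (((M:Int)+1)+1) = PySem.List.pyRange 1 ((M:Int)+1) ++ [(M:Int)+1]
          from PySem.List.pyRange_one_succ_right (by omega),
        List.foldl_append, List.foldl_cons, List.foldl_nil]
    obtain ⟨ih1, ih2⟩ := ih
    have hin := pvB_inner F target M nN _ ih2 nN le_rfl
    obtain ⟨g1, g2, _, _⟩ := hin
    constructor
    · exact g1
    · intro t ht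
      rw [g2 t]
      congr 1
      omega

-- the two ports agree
theorem pv_ab_eq (words : List String) (target : String) :
    numWaysPythonic words target = numWaysPythonic_alt words target := by
  have hm := PySem.Str.len_eq target
  have hn := PySem.Str.len_eq ((PySem.List.pyGet? words 0).getD "")
  simp only [numWaysPythonic, numWaysPythonic_alt]
  rw [hm, hn]
  set mN := target.toList.length with hmN
  set nN := ((PySem.List.pyGet? words 0).getD "").toList.length with hnN
  by_cases hg : (mN : Int) > (nN : Int)
  · rw [if_pos hg, if_pos hg]
  · rw [if_neg hg, if_neg hg]
    have hmn : mN ≤ nN := by omega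
    have hA : ∀ (F : List (PySem.Dict Char Int)),
        ((PySem.List.pyRange 1 ((mN : Int) + 1) 1).foldl
            (fun dp i => (PySem.List.pyRange 1 ((nN : Int) + 1) 1).foldl
              (pvStepA (pvBB F target) (pvCC F target) i) dp)
            ((PySem.List.pyRange 0 ((nN : Int) + 1) 1).foldl
              (fun dp j => dp.insert ((0 : Int), j) (1 : Int)) PySem.Dict.empty)).getD
          ((mN : Int), (nN : Int)) 0
          = pvW (pvBB F target) (pvCC F target) mN nN := by
      intro F
      have hbase : ∀ a b : Int,
          ((PySem.List.pyRange 0 ((nN : Int) + 1) 1).foldl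
            (fun dp j => dp.insert ((0 : Int), j) (1 : Int)) PySem.Dict.empty).getD (a, b) 0
          = pvV (pvBB F target) (pvCC F target) nN 0 a b := by
        intro a b
        rw [show (nN : Int) + 1 = ((nN + 1 : Nat) : Int) by push_cast; ring, pvA_base]
        unfold pvV
        split_ifs with g1 g2 g3 <;> first | rfl | omega
      rw [pvA_outer _ _ nN mN _ hbase, pvV_read _ _ nN mN mN nN le_rfl le_rfl]
    have hB : ∀ (F : List (PySem.Dict Char Int)), (∀ d ∈ F, d.keys.Nodup) →
        (match ((PySem.List.pyRange 1 ((mN : Int) + 1) 1).foldl (fun prev i =>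
            (((((PySem.List.pyRange 0 (nN : Int) 1).foldl (fun idx j =>
                (((PySem.List.pyGet? F j).getD PySem.Dict.empty).items).foldl
                  (fun idx p => idx.insert p.1 ((idx.getD p.1 []) ++ [(j + 1, p.2)])) idx)
                PySem.Dict.empty)).getD ((PySem.Str.pyGet? target (i - 1)).getD ' ') []).foldl pvStepB
              ([], 0, prev, 0)).1)
            [((0 : Int), (1 : Int))]).getLast? with
          | some p => p.2
          | none => 0)
          = pvW (pvBB F target) (pvCC F target) mN nN := by
      intro F hnd
      have hev : ∀ (prev : List (Int × Int)), ∀ i ∈ PySem.List.pyRange 1 ((mN : Int) + 1) 1,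
          (((((PySem.List.pyRange 0 (nN : Int) 1).foldl (fun idx j =>
              (((PySem.List.pyGet? F j).getD PySem.Dict.empty).items).foldl
                (fun idx p => idx.insert p.1 ((idx.getD p.1 []) ++ [(j + 1, p.2)])) idx)
              PySem.Dict.empty)).getD ((PySem.Str.pyGet? target (i - 1)).getD ' ') []).foldl pvStepB
            ([], 0, prev, 0)).1
          = ((pvEvents F ((PySem.Str.pyGet? target (i - 1)).getD ' ') nN).foldl pvStepB
            ([], 0, prev, 0)).1 := by
        intro prev i _
        rw [pvIndex_spec F hnd nN]
      rw [PySem.List.foldl_congr_mem _ _ _ _ hev]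
      obtain ⟨g1, g2⟩ := pvB_outer F target nN mN
      rw [← pvEval_getLast _ 0 (nN : Int) (fun p hp => (g1 p hp).2), g2 nN le_rfl]
    have hndF := pvFreq_nodup words
      ((PySem.List.pyRange 0 (nN : Int) 1).map (fun _ => (PySem.Dict.empty : PySem.Dict Char Int)))
      (by
        intro d hd
        rcases List.mem_map.mp hd with ⟨_, _, rfl⟩
        simp [PySem.Dict.keys_empty])
    exact (hA _).trans ((hB _ hndF).symm)

-- ===== VERDICT (by name: the statement is the Claim_ definition above) =====
theorem numWaysPythonic_spec : Claim_equal_numWaysPythonic := by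
  intro words target _ _
  unfold Spec_numWaysPythonic
  exact pv_ab_eq words target
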